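-- pv_equiv track=rewrite | github.com/jskim7018/leetcode_study | algorithm_study/2025/12/20251222/medium/LC_3557.py | maxSubstrings
-- ===== SOURCE A (Python) =====
-- from collections import defaultdict
--
-- def maxSubstrings(word: str) -> int:
--     left_most_idx = defaultdict(lambda: -1)
--
--     ans = 0
--     for i, ch in enumerate(word):
--         if left_most_idx[ch] == -1:
--             left_most_idx[ch] = i
--         if i - left_most_idx[ch] + 1 >= 4:
--             ans += 1
--             left_most_idx.clear()
--
--     return ans
-- ===== SOURCE B (Python) =====
-- def maxSubstrings(word: str) -> int:
--     # Pass 1: reach[j] = largest index k <= j - 3 with word[k] == word[j], else -1,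
--     # maintained with a last-occurrence dict delayed by 3 positions.
--     last = {}
--     reach = []
--     for j, ch in enumerate(word):
--         if j >= 3:
--             last[word[j - 3]] = j - 3
--         reach.append(last.get(ch, -1))
--     # Pass 2: dict-free greedy over reach: a substring can end at j for the current
--     # window start exactly when reach[j] >= start.
--     ans = 0
--     start = 0
--     for j, r in enumerate(reach):
--         if r >= start:
--             ans += 1
--             start = j + 1
--     return ans
-- ===== Notes on version B (the rewrite author's own statement) =====
-- stated objective: alternative
-- what changed: Replaces A's single pass with a clear-on-trigger first-occurrence defaultdict by two staged passes: pass 1 precomputes reach[j], the last occurrence of word[j] at index <= j-3, using a last-occurrence dict delayed by 3 positions (never cleared); pass 2 is a dict-free greedy scan that counts j with reach[j] >= start.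
import Mathlib
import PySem

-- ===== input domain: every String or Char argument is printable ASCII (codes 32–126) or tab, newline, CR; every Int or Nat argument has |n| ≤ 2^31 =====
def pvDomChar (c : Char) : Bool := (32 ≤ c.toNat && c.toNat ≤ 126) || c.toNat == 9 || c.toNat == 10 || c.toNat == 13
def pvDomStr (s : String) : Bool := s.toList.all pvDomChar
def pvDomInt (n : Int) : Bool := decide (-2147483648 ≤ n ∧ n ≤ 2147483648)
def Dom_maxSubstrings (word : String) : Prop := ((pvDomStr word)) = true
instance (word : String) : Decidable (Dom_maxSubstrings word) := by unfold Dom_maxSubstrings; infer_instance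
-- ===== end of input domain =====

-- B replaces A's single pass with a clear-on-trigger first-occurrence defaultdict by two staged
-- passes: pass 1 precomputes reach[j] (last occurrence of word[j] at index <= j-3) with a
-- delayed last-occurrence dict, pass 2 is a dict-free greedy scan over reach (objective: alternative).


-- ===== PORT A =====
-- Loop body of A. The defaultdict access `left_most_idx[ch]` inserts ch ↦ -1 when absent, but that
-- entry is immediately overwritten with i by the branch that fires exactly then, so reading with
-- default -1 (getD) is value-exact.
def pvStepA (st : PySem.Dict Char Int × Int) (p : Int × Char) : PySem.Dict Char Int × Int :=
  let d := if st.1.getD p.2 (-1) = -1 then st.1.insert p.2 p.1 else st.1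
  if 4 ≤ p.1 - d.getD p.2 (-1) + 1 then (PySem.Dict.empty, st.2 + 1) else (d, st.2)

def maxSubstrings (word : String) : Int :=
  ((PySem.List.enumerate word.toList 0).foldl pvStepA (PySem.Dict.empty, 0)).2

-- ===== PORT B =====
-- Pass-1 loop body of B over (j, ch) pairs; state = (last-occurrence dict delayed by 3, reach list).
-- `word[j - 3]` is read with pyGet?; the branch guard 3 ≤ j keeps the index in range, so the
-- `.getD ' '` default is never used.
def pvStep1 (w : List Char) (st : PySem.Dict Char Int × List Int) (p : Int × Char) :
    PySem.Dict Char Int × List Int :=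
  let last := if 3 ≤ p.1 then st.1.insert ((PySem.List.pyGet? w (p.1 - 3)).getD ' ') (p.1 - 3) else st.1
  (last, st.2 ++ [last.getD p.2 (-1)])

-- Pass-2 loop body of B over (j, r) pairs; state = (ans, start).
def pvStep2 (st : Int × Int) (p : Int × Int) : Int × Int :=
  if st.2 ≤ p.2 then (st.1 + 1, p.1 + 1) else st

def maxSubstrings_alt (word : String) : Int :=
  let reach := ((PySem.List.enumerate word.toList 0).foldl (pvStep1 word.toList)
    (PySem.Dict.empty, [])).2
  ((PySem.List.enumerate reach 0).foldl pvStep2 (0, 0)).1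

-- ===== PRECONDITION & SPEC =====
def Spec_maxSubstrings (word : String) (out : Int) : Prop := out = maxSubstrings_alt word
instance (word : String) (out : Int) : Decidable (Spec_maxSubstrings word out) := by unfold Spec_maxSubstrings; infer_instance

-- ===== CLAIM (what is proved, stated in full; the proofs are below) =====
def Claim_equal_maxSubstrings : Prop := ∀ (word : String), Dom_maxSubstrings word → Spec_maxSubstrings word (maxSubstrings word)

-- ===== LEMMAS AND PROOFS =====

-- Proof-side reference loop: greedy windowed scan with a fresh first-occurrence dict per window;
-- A's fold is shown equal to it (pvFold_eq) and it is shown equal to B's staged passes (pvMain).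
def pvInnerB (d : PySem.Dict Char Int) : List (Int × Char) → Option (List (Int × Char))
  | [] => none
  | (j, ch) :: rest =>
    let d' := if d.contains ch then d else d.insert ch j
    if 4 ≤ j - d'.getD ch (-1) + 1 then some rest else pvInnerB d' rest

theorem pvInnerB_length : ∀ (l : List (Int × Char)) (d : PySem.Dict Char Int)
    (r : List (Int × Char)), pvInnerB d l = some r → r.length < l.length := by
  intro l
  induction l with
  | nil => intro d r h; simp [pvInnerB] at h
  | cons p rest ih =>
    intro d r h
    obtain ⟨j, ch⟩ := p
    rw [pvInnerB] at h
    by_cases hc : 4 ≤ j - (if d.contains ch then d else d.insert ch j).getD ch (-1) + 1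
    · rw [if_pos hc] at h
      cases h; simp
    · rw [if_neg hc] at h
      exact Nat.lt_trans (ih _ _ h) (by simp)

def pvOuterB (l : List (Int × Char)) : Int :=
  match h : pvInnerB PySem.Dict.empty l with
  | none => 0
  | some rest => 1 + pvOuterB rest
termination_by l.length
decreasing_by exact pvInnerB_length l _ _ h

theorem pvOuterB_eq (l : List (Int × Char)) :
    pvOuterB l = match pvInnerB PySem.Dict.empty l with
      | none => 0 | some rest => 1 + pvOuterB rest := by
  rw [pvOuterB]; split <;> simp_all

theorem pvEnum_nonneg : ∀ (xs : List Char) (s : Int),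
    ∀ p ∈ PySem.List.enumerate xs s, s ≤ p.1 := by
  intro xs
  induction xs with
  | nil => intro s p h; simp [PySem.List.enumerate_nil] at h
  | cons x xs ih =>
    intro s p h
    rw [PySem.List.enumerate_cons] at h
    rcases List.mem_cons.1 h with h | h
    · simp [h]
    · have := ih (s + 1) p h; omega

-- A's fold from any dict whose stored indices are all ≥ 0 computes ans + the windowed scan's count.
theorem pvFold_eq : ∀ (l : List (Int × Char)) (d : PySem.Dict Char Int) (ans : Int),
    (∀ p ∈ d.items, 0 ≤ p.2) → (∀ p ∈ l, 0 ≤ p.1) →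
    (l.foldl pvStepA (d, ans)).2 =
      ans + (match pvInnerB d l with | none => 0 | some rest => 1 + pvOuterB rest) := by
  intro l
  induction l with
  | nil => intro d ans _ _; simp [pvInnerB]
  | cons p rest ih =>
    intro d ans hinv hidx
    obtain ⟨j, ch⟩ := p
    have hj : 0 ≤ j := hidx (j, ch) (by simp)
    have hdict : (if d.getD ch (-1) = -1 then d.insert ch j else d)
        = (if d.contains ch then d else d.insert ch j) := by
      cases hg : d.get? ch with
      | none =>
        have hc : d.contains ch = false := by
          rw [PySem.Dict.contains_eq_isSome_get?, hg]; rfl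
        have hgd : d.getD ch (-1) = -1 := PySem.Dict.getD_of_get?_eq_none d (-1) hg
        simp [hgd, hc]
      | some v =>
        have hv : 0 ≤ v := hinv (ch, v) (PySem.Dict.mem_items_of_get?_eq_some d hg)
        have hc : d.contains ch = true := by
          rw [PySem.Dict.contains_eq_isSome_get?, hg]; rfl
        have hgd : d.getD ch (-1) = v := PySem.Dict.getD_of_get?_eq_some d (-1) hg
        rw [hgd, hc, if_neg (by omega), if_pos rfl]
    rw [List.foldl_cons, pvInnerB]
    show (rest.foldl pvStepA (pvStepA (d, ans) (j, ch))).2 = _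
    rw [pvStepA]
    simp only [hdict]
    set d' := if d.contains ch then d else d.insert ch j with hd'
    have hinv' : ∀ p ∈ d'.items, 0 ≤ p.2 := by
      intro p hp
      rw [hd'] at hp
      split at hp
      · exact hinv p hp
      · rcases (PySem.Dict.mem_items_insert d ch j p).1 hp with h | h
        · rw [h]; exact hj
        · exact hinv p h.1
    by_cases htr : 4 ≤ j - d'.getD ch (-1) + 1
    · rw [if_pos htr, if_pos htr]
      have hIH := ih PySem.Dict.empty (ans + 1)
        (by intro p hp; simp [PySem.Dict.empty] at hp)
        (fun p hp => hidx p (by simp [hp]))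
      rw [hIH]
      show _ = ans + (1 + pvOuterB rest)
      rw [pvOuterB_eq]
      ring
    · rw [if_neg htr, if_neg htr]
      exact ih d' ans hinv' (fun p hp => hidx p (by simp [hp]))

-- last occurrence of c among indices < m, or -1
def pvLastD (w : List Char) (c : Char) : Nat → Int
  | 0 => -1
  | m + 1 => if w.getD m ' ' = c then (m : Int) else pvLastD w c m

-- the value B's pass 1 stores at position j
def pvF (w : List Char) (j : Nat) : Int := pvLastD w (w.getD j ' ') (j - 2)

theorem pvLastD_ge_iff (w : List Char) (c : Char) (i : Int) (h0 : 0 ≤ i) : ∀ (m : Nat),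
    (i ≤ pvLastD w c m ↔ ∃ k : Nat, i ≤ (k : Int) ∧ k < m ∧ w.getD k ' ' = c) := by
  intro m
  induction m with
  | zero => simp [pvLastD]; omega
  | succ m ih =>
    rw [pvLastD]
    by_cases hc : w.getD m ' ' = c
    · rw [if_pos hc]
      constructor
      · intro him; exact ⟨m, him, by omega, hc⟩
      · rintro ⟨k, hik, hkm, _⟩
        have : (k : Int) ≤ m := by exact_mod_cast Nat.lt_succ_iff.1 hkm
        omega
    · rw [if_neg hc, ih]
      constructor
      · rintro ⟨k, h1, h2, h3⟩; exact ⟨k, h1, by omega, h3⟩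
      · rintro ⟨k, h1, h2, h3⟩
        refine ⟨k, h1, ?_, h3⟩
        rcases Nat.lt_succ_iff_lt_or_eq.1 h2 with h | h
        · exact h
        · subst h; exact absurd h3 hc

-- d encodes the FIRST occurrence in window [i, t) of each character (A's window dict)
def pvDSpec (w : List Char) (i : Int) (t : Nat) (d : PySem.Dict Char Int) : Prop :=
  ∀ c : Char,
    (d.get? c = none ∧ ∀ k : Nat, i ≤ (k : Int) → k < t → w.getD k ' ' ≠ c) ∨
    (∃ k : Nat, d.get? c = some (k : Int) ∧ i ≤ (k : Int) ∧ k < t ∧ w.getD k ' ' = c ∧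
      ∀ k' : Nat, i ≤ (k' : Int) → k' < k → w.getD k' ' ' ≠ c)

theorem pvDSpec_start (w : List Char) (t : Nat) :
    pvDSpec w (t : Int) t PySem.Dict.empty := by
  intro c
  left
  refine ⟨by simp [pysem], ?_⟩
  intro k hik hkt
  exfalso
  have : (k : Int) < t := by exact_mod_cast hkt
  omega

theorem pvDSpec_step (w : List Char) (i : Int) (t : Nat) (d : PySem.Dict Char Int)
    (hit : i ≤ (t : Int)) (h : pvDSpec w i t d) :
    pvDSpec w i (t + 1)
      (if d.contains (w.getD t ' ') then d else d.insert (w.getD t ' ') (t : Int)) := by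
  intro c
  by_cases hc : d.contains (w.getD t ' ')
  · rw [if_pos hc]
    rcases h c with ⟨hn, hno⟩ | ⟨k, hg, hik, hkt, hwk, hmin⟩
    · by_cases hceq : w.getD t ' ' = c
      · exfalso
        subst hceq
        rw [PySem.Dict.contains_eq_isSome_get?, hn] at hc
        simp at hc
      · left
        refine ⟨hn, ?_⟩
        intro k hik hkt1
        rcases Nat.lt_succ_iff_lt_or_eq.1 hkt1 with hlt | heq
        · exact hno k hik hlt
        · subst heq; exact hceq
    · right
      exact ⟨k, hg, hik, by omega, hwk, hmin⟩
  · rw [if_neg hc]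
    by_cases hceq : w.getD t ' ' = c
    · right
      refine ⟨t, ?_, hit, by omega, hceq, ?_⟩
      · rw [← hceq, PySem.Dict.get?_insert_self]
      · intro k' hik' hk't
        rcases h c with ⟨_, hno⟩ | ⟨k, hg, _, _, hwk, _⟩
        · exact hno k' hik' hk't
        · exfalso
          have : d.contains (w.getD t ' ') = true := by
            rw [PySem.Dict.contains_eq_isSome_get?, hceq, hg]; rfl
          rw [this] at hc; exact absurd rfl hc
    · have hne : c ≠ w.getD t ' ' := fun he => hceq he.symm
      rcases h c with ⟨hn, hno⟩ | ⟨k, hg, hik, hkt, hwk, hmin⟩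
      · left
        refine ⟨?_, ?_⟩
        · rw [PySem.Dict.get?_insert_of_ne _ _ hne]; exact hn
        · intro k hik hkt1
          rcases Nat.lt_succ_iff_lt_or_eq.1 hkt1 with hlt | heq
          · exact hno k hik hlt
          · subst heq; exact hceq
      · right
        refine ⟨k, ?_, hik, by omega, hwk, hmin⟩
        rw [PySem.Dict.get?_insert_of_ne _ _ hne]; exact hg

-- A's trigger condition at position t with window dict d equals B's test i ≤ reach[t]
theorem pvCond_iff (w : List Char) (i : Int) (t : Nat) (d : PySem.Dict Char Int)
    (h0 : 0 ≤ i) (hs : pvDSpec w i t d) :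
    (4 ≤ (t : Int) - (if d.contains (w.getD t ' ') then d
        else d.insert (w.getD t ' ') (t : Int)).getD (w.getD t ' ') (-1) + 1
      ↔ i ≤ pvF w t) := by
  rw [pvF, pvLastD_ge_iff w _ i h0 (t - 2)]
  by_cases hc : d.contains (w.getD t ' ')
  · rw [if_pos hc]
    rcases hs (w.getD t ' ') with ⟨hn, _⟩ | ⟨k, hg, hik, hkt, hwk, hmin⟩
    · exfalso
      rw [PySem.Dict.contains_eq_isSome_get?, hn] at hc
      simp at hc
    · rw [PySem.Dict.getD_of_get?_eq_some d (-1) hg]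
      constructor
      · intro h4
        refine ⟨k, hik, by omega, hwk⟩
      · rintro ⟨k', hik', hk't, hwk'⟩
        have hkk' : k ≤ k' := by
          by_contra hlt
          exact hmin k' hik' (by omega) hwk'
        omega
  · rw [if_neg hc, PySem.Dict.getD_insert_self]
    rcases hs (w.getD t ' ') with ⟨_, hno⟩ | ⟨k, hg, _, _, _, _⟩
    · constructor
      · intro h4; exfalso; omega
      · rintro ⟨k', hik', hk't, hwk'⟩
        exact absurd hwk' (hno k' hik' (by omega))
    · exfalso
      rw [PySem.Dict.contains_eq_isSome_get?, hg] at hc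
      exact absurd rfl hc

-- Pass-1 invariant: after m iterations the dict reads pvLastD · (m-3) and reach = map pvF (range m)
theorem pvPass1_inv (w : List Char) : ∀ (m : Nat), m ≤ w.length →
    (∀ c, (((PySem.List.enumerate w 0).take m).foldl (pvStep1 w)
        (PySem.Dict.empty, ([] : List Int))).1.getD c (-1) = pvLastD w c (m - 3)) ∧
    (((PySem.List.enumerate w 0).take m).foldl (pvStep1 w)
        (PySem.Dict.empty, ([] : List Int))).2 = (List.range m).map (pvF w) := by
  intro m
  induction m with
  | zero => intro _; constructor
            · intro c; simp [pysem, pvLastD]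
            · simp
  | succ m ih =>
    intro hm1
    have hm : m < w.length := by omega
    obtain ⟨ihd, iha⟩ := ih (by omega)
    have hme : m < (PySem.List.enumerate w 0).length := by
      rw [PySem.List.length_enumerate]; exact hm
    have htake : (PySem.List.enumerate w 0).take (m + 1)
        = (PySem.List.enumerate w 0).take m ++ [((m : Int), w[m])] := by
      rw [List.take_add_one, List.getElem?_eq_getElem hme, PySem.List.getElem_enumerate]
      simp
    rw [htake, List.foldl_append, List.foldl_cons, List.foldl_nil]
    set st := ((PySem.List.enumerate w 0).take m).foldl (pvStep1 w)
      (PySem.Dict.empty, ([] : List Int)) with hst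
    have hgetDm : ∀ c, (pvStep1 w st ((m : Int), w[m])).1.getD c (-1) = pvLastD w c (m + 1 - 3) := by
      intro c
      show ((if 3 ≤ (m : Int) then
          st.1.insert ((PySem.List.pyGet? w ((m : Int) - 3)).getD ' ') ((m : Int) - 3)
        else st.1)).getD c (-1) = _
      by_cases h3 : 3 ≤ (m : Int)
      · have h3n : 3 ≤ m := by exact_mod_cast h3
        have hidx : (m : Int) - 3 = ((m - 3 : Nat) : Int) := by omega
        have hget : PySem.List.pyGet? w ((m : Int) - 3) = some w[m - 3] := by
          rw [hidx, PySem.List.pyGet?_natCast, List.getElem?_eq_getElem (by omega)]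
        simp only [if_pos h3, hget, Option.getD_some]
        have hsub : m + 1 - 3 = (m - 3) + 1 := by omega
        have hgd : w.getD (m - 3) ' ' = w[m - 3] := List.getD_eq_getElem w ' ' (by omega)
        rw [hsub, pvLastD, PySem.Dict.getD_insert, hidx, hgd]
        by_cases hck : c = w[m - 3]
        · rw [if_pos hck, if_pos hck.symm]
        · rw [if_neg hck, if_neg (fun he => hck he.symm), ihd]
      · have hsub : m + 1 - 3 = m - 3 := by omega
        simp only [if_neg h3, hsub]
        exact ihd c
    constructor
    · exact hgetDm
    · show (pvStep1 w st ((m : Int), w[m])).2 = _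
      have happ : (pvStep1 w st ((m : Int), w[m])).2
          = st.2 ++ [(pvStep1 w st ((m : Int), w[m])).1.getD w[m] (-1)] := rfl
      rw [happ, hgetDm, iha, List.range_succ, List.map_append, List.map_singleton]
      have : pvF w m = pvLastD w w[m] (m + 1 - 3) := by
        rw [pvF, List.getD_eq_getElem w ' ' hm]
        have hsub : m - 2 = m + 1 - 3 := by omega
        rw [hsub]
      rw [this]

-- Main correspondence: the windowed greedy scan equals B's pass-2 fold over the reach values
theorem pvMain (w : List Char) : ∀ (r t : Nat) (i ans : Int) (d : PySem.Dict Char Int),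
    w.length ≤ t + r → 0 ≤ i → i ≤ (t : Int) → pvDSpec w i t d →
    ans + (match pvInnerB d ((PySem.List.enumerate w 0).drop t) with
           | none => 0 | some rest => 1 + pvOuterB rest)
    = (((PySem.List.enumerate ((List.range w.length).map (pvF w)) 0).drop t).foldl
        pvStep2 (ans, i)).1 := by
  intro r
  induction r with
  | zero =>
    intro t i ans d hlen _ _ _
    have h1 : (PySem.List.enumerate w 0).drop t = [] := by
      rw [List.drop_eq_nil_iff, PySem.List.length_enumerate]; omega
    have h2 : (PySem.List.enumerate ((List.range w.length).map (pvF w)) 0).drop t = [] := by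
      rw [List.drop_eq_nil_iff, PySem.List.length_enumerate]; simp; omega
    rw [h1, h2]
    simp [pvInnerB]
  | succ r ih =>
    intro t i ans d hlen h0 hit hs
    by_cases htn : w.length ≤ t
    · have h1 : (PySem.List.enumerate w 0).drop t = [] := by
        rw [List.drop_eq_nil_iff, PySem.List.length_enumerate]; omega
      have h2 : (PySem.List.enumerate ((List.range w.length).map (pvF w)) 0).drop t = [] := by
        rw [List.drop_eq_nil_iff, PySem.List.length_enumerate]; simp; omega
      rw [h1, h2]
      simp [pvInnerB]
    · have ht : t < w.length := by omega
      have hme : t < (PySem.List.enumerate w 0).length := by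
        rw [PySem.List.length_enumerate]; exact ht
      have hme2 : t < (PySem.List.enumerate ((List.range w.length).map (pvF w)) 0).length := by
        rw [PySem.List.length_enumerate]; simp; exact ht
      rw [List.drop_eq_getElem_cons hme, List.drop_eq_getElem_cons hme2,
        PySem.List.getElem_enumerate, PySem.List.getElem_enumerate]
      have hreach : ((List.range w.length).map (pvF w))[t]'(by simp; exact ht) = pvF w t := by
        rw [List.getElem_map, List.getElem_range]
      rw [hreach]
      have hwt : w[t] = w.getD t ' ' := (List.getD_eq_getElem w ' ' ht).symm
      rw [pvInnerB, hwt]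
      simp only [zero_add]
      have hcond := pvCond_iff w i t d h0 hs
      by_cases htr : i ≤ pvF w t
      · rw [if_pos (hcond.2 htr)]
        rw [List.foldl_cons]
        have hstep : pvStep2 (ans, i) ((t : Int), pvF w t) = (ans + 1, (t : Int) + 1) := by
          rw [pvStep2, if_pos htr]
        rw [hstep]
        have hIH := ih (t + 1) ((t : Int) + 1) (ans + 1) PySem.Dict.empty (by omega)
          (by omega) (by push_cast; omega)
          (by have := pvDSpec_start w (t + 1); push_cast at this ⊢; exact this)
        push_cast at hIH ⊢
        rw [← hIH]
        rw [pvOuterB_eq]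
        cases pvInnerB PySem.Dict.empty ((PySem.List.enumerate w 0).drop (t + 1)) with
        | none => push_cast; ring
        | some rest => push_cast; ring
      · rw [if_neg (fun hc => htr (hcond.1 hc))]
        rw [List.foldl_cons]
        have hstep : pvStep2 (ans, i) ((t : Int), pvF w t) = (ans, i) := by
          rw [pvStep2, if_neg htr]
        rw [hstep]
        have hIH := ih (t + 1) i ans
          (if d.contains (w.getD t ' ') then d else d.insert (w.getD t ' ') (t : Int))
          (by omega) h0 (by push_cast; omega) (pvDSpec_step w i t d hit hs)
        push_cast at hIH ⊢
        exact hIH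

-- ===== VERDICT (by name: the statement is the Claim_ definition above) =====
theorem maxSubstrings_spec : Claim_equal_maxSubstrings := by
  intro word _
  unfold Spec_maxSubstrings maxSubstrings maxSubstrings_alt
  rw [pvFold_eq _ PySem.Dict.empty 0
      (by intro p hp; simp [PySem.Dict.empty] at hp)
      (fun p hp => pvEnum_nonneg _ 0 p hp)]
  have hreach : ((PySem.List.enumerate word.toList 0).foldl (pvStep1 word.toList)
      (PySem.Dict.empty, ([] : List Int))).2
      = (List.range word.toList.length).map (pvF word.toList) := by
    have hfull : (PySem.List.enumerate word.toList 0).take word.toList.length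
        = PySem.List.enumerate word.toList 0 := by
      rw [← PySem.List.length_enumerate word.toList 0, List.take_length]
    rw [← hfull]
    exact (pvPass1_inv word.toList word.toList.length le_rfl).2
  rw [hreach]
  have := pvMain word.toList word.toList.length 0 0 0 PySem.Dict.empty
    (by omega) le_rfl (by simp)
    (by have := pvDSpec_start word.toList 0; push_cast at this ⊢; exact this)
  simp only [List.drop_zero] at this
  rw [← this]
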